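-- pv_equiv track=rewrite | github.com/DIZ-admin/openai-agents-python | examples/erni-foto-agency/erni_foto_agency/main.py | _match_choice
-- ===== SOURCE A (Python) =====
-- def _match_choice(value: str, choices: list[str]) -> str | None:
--     """Find best matching choice value using case-insensitive comparison."""
--
--     normalized = value.lower()
--     for choice in choices:
--         if normalized == choice.lower():
--             return choice
--
--     for choice in choices:
--         choice_lower = choice.lower()
--         if normalized in choice_lower or choice_lower in normalized:
--             return choice
--
--     return None
-- ===== SOURCE B (Python) =====
-- def _match_choice(value: str, choices: list[str]) -> str | None:
--     """Single pass: exact match returns immediately; first substring candidate kept as fallback."""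
--     normalized = value.lower()
--     fallback = None
--     for choice in choices:
--         choice_lower = choice.lower()
--         if normalized == choice_lower:
--             return choice
--         if fallback is None and (normalized in choice_lower or choice_lower in normalized):
--             fallback = choice
--     return fallback
-- ===== Notes on version B (the rewrite author's own statement) =====
-- stated objective: simpler
-- what changed: Replaced the two sequential scans over choices (exact-match scan, then substring scan) by a single pass that returns an exact match immediately and records the first substring candidate in a fallback variable.
import Mathlib
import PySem

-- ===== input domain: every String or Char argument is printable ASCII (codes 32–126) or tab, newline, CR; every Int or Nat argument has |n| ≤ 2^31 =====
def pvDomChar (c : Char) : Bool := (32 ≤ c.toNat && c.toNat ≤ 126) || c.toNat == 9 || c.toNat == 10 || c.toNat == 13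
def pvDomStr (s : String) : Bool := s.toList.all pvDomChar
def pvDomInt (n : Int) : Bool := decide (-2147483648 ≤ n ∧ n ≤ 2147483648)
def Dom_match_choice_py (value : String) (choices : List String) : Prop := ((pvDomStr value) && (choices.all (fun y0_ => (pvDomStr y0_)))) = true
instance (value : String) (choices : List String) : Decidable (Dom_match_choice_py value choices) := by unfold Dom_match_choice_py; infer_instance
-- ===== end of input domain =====

-- One honest line: B collapses A's two scans (exact match, then substring) into a single pass
-- with a fallback variable; same return value, simpler control flow.

-- ===== PORT A =====
-- first loop of A: return the first choice whose lower() equals normalized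
def pvLoop1 (normalized : String) : List String → Option String
  | [] => none
  | c :: t => if normalized = PySem.Str.lower c then some c else pvLoop1 normalized t

-- second loop of A: return the first choice related to normalized by substring containment
def pvLoop2 (normalized : String) : List String → Option String
  | [] => none
  | c :: t =>
      let cl := PySem.Str.lower c
      if PySem.Str.isIn normalized cl || PySem.Str.isIn cl normalized then some c
      else pvLoop2 normalized t

def match_choice_py (value : String) (choices : List String) : Option String :=
  let normalized := PySem.Str.lower value
  match pvLoop1 normalized choices with
  | some c => some c
  | none => pvLoop2 normalized choices

-- ===== PORT B =====
-- single pass: exact match returns immediately, first substring candidate kept in fallback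
def pvAltLoop (normalized : String) (fallback : Option String) : List String → Option String
  | [] => fallback
  | c :: t =>
      let cl := PySem.Str.lower c
      if normalized = cl then some c
      else pvAltLoop normalized
        (if fallback.isNone && (PySem.Str.isIn normalized cl || PySem.Str.isIn cl normalized)
         then some c else fallback) t

def match_choice_py_alt (value : String) (choices : List String) : Option String :=
  pvAltLoop (PySem.Str.lower value) none choices

-- ===== PRECONDITION & SPEC =====
def Spec_match_choice_py (value : String) (choices : List String) (out : Option String) : Prop := out = match_choice_py_alt value choices
instance (value : String) (choices : List String) (out : Option String) : Decidable (Spec_match_choice_py value choices out) := by unfold Spec_match_choice_py; infer_instance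

-- ===== CLAIM (what is proved, stated in full; the proofs are below) =====
def Claim_equal_match_choice_py : Prop := ∀ (value : String) (choices : List String), Dom_match_choice_py value choices → Spec_match_choice_py value choices (match_choice_py value choices)

-- ===== LEMMAS AND PROOFS =====
-- Invariant of B's single pass: with pending fallback fb it equals A's loop1, then fb, then A's loop2.
theorem pvAltLoop_eq (normalized : String) (choices : List String) :
    ∀ fb : Option String,
      pvAltLoop normalized fb choices =
        match pvLoop1 normalized choices with
        | some c => some c
        | none => match fb with
                  | some f => some f
                  | none => pvLoop2 normalized choices := by
  induction choices with
  | nil => intro fb; cases fb <;> rfl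
  | cons c t ih =>
      intro fb
      simp only [pvAltLoop, pvLoop1, pvLoop2]
      by_cases hx : normalized = PySem.Str.lower c
      · simp [hx]
      · simp only [hx, if_false]
        cases fb with
        | some f => simpa using ih (some f)
        | none =>
            cases hs : (PySem.Str.isIn normalized (PySem.Str.lower c) ||
                PySem.Str.isIn (PySem.Str.lower c) normalized) with
            | true => simpa using ih (some c)
            | false => simpa using ih none

-- ===== VERDICT (by name: the statement is the Claim_ definition above) =====
theorem match_choice_py_spec : Claim_equal_match_choice_py := by
  intro value choices _
  unfold Spec_match_choice_py match_choice_py match_choice_py_alt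
  rw [pvAltLoop_eq]
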